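-- pv_equiv track=rewrite | github.com/hacetheworld/competitive-programming-practices | problems/codeforce/800-1200/B_String_LCM.py | check
-- ===== SOURCE A (Python) =====
-- def check(s1, s2, n, m):
--     i = 0
--     j = 0
--     while i < n and j < m:
--         if s1[i] != s2[j]:
--             return False
--         i += 1
--         j += 1
--         if j == m:
--             j = 0
--     return (i == n and j == 0)
-- ===== SOURCE B (Python) =====
-- def check(s1, s2, n, m):
--     if n <= 0 or m <= 0:
--         return n == 0
--     return n % m == 0 and s1[:n] == s2[:m] * (n // m)
-- ===== Notes on version B (the rewrite author's own statement) =====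
-- stated objective: simpler
-- what changed: Replaces the two-pointer index-cycling character loop by a divisibility test n % m == 0 plus one bulk comparison of s1[:n] against s2[:m] repeated n//m times, with the degenerate n<=0 or m<=0 cases handled up front; the repetition-and-bulk-compare runs at C speed instead of a per-character Python loop.
-- outside the precondition, e.g. on check('ab', 'x', 5, 1): A returns False, B returns False; on check('ab', 'x', 2147483648, 1): A returns False, B does not finish within the time limit
import Mathlib
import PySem

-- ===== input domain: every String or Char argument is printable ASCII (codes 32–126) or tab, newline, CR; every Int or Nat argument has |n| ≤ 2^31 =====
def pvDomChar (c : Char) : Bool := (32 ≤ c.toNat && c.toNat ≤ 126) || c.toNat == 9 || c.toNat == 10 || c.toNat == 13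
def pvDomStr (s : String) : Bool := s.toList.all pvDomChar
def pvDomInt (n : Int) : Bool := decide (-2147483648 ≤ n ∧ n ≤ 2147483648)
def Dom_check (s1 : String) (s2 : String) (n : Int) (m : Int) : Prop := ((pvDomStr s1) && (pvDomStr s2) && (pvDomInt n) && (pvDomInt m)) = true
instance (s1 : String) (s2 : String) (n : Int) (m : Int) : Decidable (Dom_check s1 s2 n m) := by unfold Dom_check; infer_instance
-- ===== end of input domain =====

-- B replaces A's two-pointer index-cycling character loop by a divisibility test plus one
-- bulk comparison of s1[:n] with s2[:m] repeated n//m times (same O(n) cost, simpler).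


-- ===== PORT A =====
-- the while loop, fuel-bounded (each iteration increments i, so n.toNat + 1 fuel is never exhausted)
def checkLoop (c1 c2 : List Char) (n m : Int) : Nat → Int → Int → Bool
  | 0, i, j => decide (i = n ∧ j = 0)
  | f + 1, i, j =>
    if i < n ∧ j < m then
      match PySem.List.pyGet? c1 i, PySem.List.pyGet? c2 j with
      | some a, some b =>
        if a ≠ b then false
        else
          let i' := i + 1
          let j' := j + 1
          let j'' := if j' = m then 0 else j'
          checkLoop c1 c2 n m f i' j''
      | _, _ => false  -- IndexError in Python; excluded by Pre_check
    else decide (i = n ∧ j = 0)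

def check (s1 : String) (s2 : String) (n : Int) (m : Int) : Bool :=
  checkLoop s1.toList s2.toList n m (n.toNat + 1) 0 0

-- ===== PORT B =====
def check_alt (s1 : String) (s2 : String) (n : Int) (m : Int) : Bool :=
  if n ≤ 0 ∨ m ≤ 0 then decide (n = 0)
  else
    decide (PySem.Int.mod n m = 0) &&
      (PySem.List.slice s1.toList none (some n) ==
        (List.replicate (PySem.Int.floordiv n m).toNat
          (PySem.List.slice s2.toList none (some m))).flatten)

-- ===== PRECONDITION & SPEC =====
-- Pre_ excludes inputs where a positive n overruns s1 or a positive min(n,m) overruns s2: there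
-- A's loop may hit an out-of-range index and raise IndexError (whether it raises or returns early
-- depends on where the first mismatch falls; the excluded returning cases are cited in the claim).
def Pre_check (s1 : String) (s2 : String) (n : Int) (m : Int) : Prop :=
  n ≤ 0 ∨ m ≤ 0 ∨ (n ≤ (s1.toList.length : Int) ∧ min n m ≤ (s2.toList.length : Int))
instance (s1 : String) (s2 : String) (n : Int) (m : Int) : Decidable (Pre_check s1 s2 n m) := by unfold Pre_check; infer_instance
def pvWitness_check : String × String × Int × Int := ("abab", "ab", 4, 2)

def Spec_check (s1 : String) (s2 : String) (n : Int) (m : Int) (out : Bool) : Prop := out = check_alt s1 s2 n m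
instance (s1 : String) (s2 : String) (n : Int) (m : Int) (out : Bool) : Decidable (Spec_check s1 s2 n m out) := by unfold Spec_check; infer_instance

-- ===== CLAIM (what is proved, stated in full; the proofs are below) =====
def Claim_equal_check : Prop := ∀ (s1 : String) (s2 : String) (n : Int) (m : Int), Dom_check s1 s2 n m → Pre_check s1 s2 n m → Spec_check s1 s2 n m (check s1 s2 n m)

-- ===== LEMMAS AND PROOFS =====

-- "every remaining position of s1[:N] matches the cycled s2[:M]"
def matchFrom (c1 c2 : List Char) (N M i : Nat) : Bool :=
  decide (∀ k, i ≤ k → k < N → c1.getD k ' ' = c2.getD (k % M) ' ')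

theorem matchFrom_succ_of_eq {c1 c2 : List Char} {N M i : Nat} (_hi : i < N)
    (h : c1.getD i ' ' = c2.getD (i % M) ' ') :
    matchFrom c1 c2 N M i = matchFrom c1 c2 N M (i + 1) := by
  simp only [matchFrom, decide_eq_decide]
  constructor
  · intro H k hk1 hk2; exact H k (by omega) hk2
  · intro H k hk1 hk2
    rcases Nat.eq_or_lt_of_le hk1 with hk | hk
    · simpa [← hk] using h
    · exact H k (by omega) hk2

theorem matchFrom_false_of_ne {c1 c2 : List Char} {N M i : Nat} (hi : i < N)
    (h : c1.getD i ' ' ≠ c2.getD (i % M) ' ') :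
    matchFrom c1 c2 N M i = false := by
  simp only [matchFrom, decide_eq_false_iff_not]
  intro H; exact h (H i le_rfl hi)

theorem succ_mod (i M : Nat) (hM : 0 < M) :
    (i + 1) % M = if i % M + 1 = M then 0 else i % M + 1 := by
  have h1 : (i + 1) % M = (i % M + 1 % M) % M := by rw [Nat.add_mod]
  rcases Nat.eq_or_lt_of_le hM with h | h
  · rw [← h]; simp [Nat.mod_one]
  · have h1M : 1 % M = 1 := Nat.mod_eq_of_lt h
    have hr : i % M < M := Nat.mod_lt _ hM
    rw [h1, h1M]
    split_ifs with he
    · rw [he, Nat.mod_self]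
    · exact Nat.mod_eq_of_lt (by omega)

-- loop invariant: at position i with j = i % M, the loop computes "all remaining match AND N % M = 0"
theorem checkLoop_eq (c1 c2 : List Char) (N M : Nat) (hM : 0 < M)
    (h1 : N ≤ c1.length) (h2 : min N M ≤ c2.length) :
    ∀ f i, i ≤ N → N - i < f →
      checkLoop c1 c2 (N : Int) (M : Int) f (i : Int) ((i % M : Nat) : Int)
        = (matchFrom c1 c2 N M i && decide (N % M = 0)) := by
  intro f
  induction f with
  | zero => intro i _ h; omega
  | succ f ih =>
    intro i hiN hf
    rcases Nat.eq_or_lt_of_le hiN with hEq | hlt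
    · -- i = N : loop guard fails, return (i == n and j == 0)
      subst hEq
      have hguard : ¬ ((i : Int) < (i : Int) ∧ ((i % M : Nat) : Int) < (M : Int)) := by
        rintro ⟨h, -⟩; exact lt_irrefl _ h
      have hmatch : matchFrom c1 c2 i M i = true := by
        simp only [matchFrom, decide_eq_true_eq]; intro k hk1 hk2; omega
      simp [checkLoop, hmatch, Int.natCast_dvd_natCast, Nat.dvd_iff_mod_eq_zero]
    · -- i < N : one comparison step
      have hguard : (i : Int) < (N : Int) ∧ ((i % M : Nat) : Int) < (M : Int) := by
        constructor
        · exact_mod_cast hlt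
        · exact_mod_cast Nat.mod_lt _ hM
      have hi1 : i < c1.length := by omega
      have hi2 : i % M < c2.length := by
        have := Nat.mod_lt i hM
        have := Nat.mod_le i M
        omega
      have hg1 : PySem.List.pyGet? c1 (i : Int) = some c1[i] := by
        rw [PySem.List.pyGet?_natCast]; exact List.getElem?_eq_getElem hi1
      have hg2 : PySem.List.pyGet? c2 ((i % M : Nat) : Int) = some c2[i % M] := by
        rw [PySem.List.pyGet?_natCast]; exact List.getElem?_eq_getElem hi2
      have hgd1 : c1.getD i ' ' = c1[i] := List.getD_eq_getElem _ _ hi1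
      have hgd2 : c2.getD (i % M) ' ' = c2[i % M] := List.getD_eq_getElem _ _ hi2
      by_cases hne : c1[i] = c2[i % M]
      · -- characters match: continue
        have hjstep : (if ((i % M : Nat) : Int) + 1 = (M : Int) then (0 : Int)
            else ((i % M : Nat) : Int) + 1) = (((i + 1) % M : Nat) : Int) := by
          rw [succ_mod i M hM]
          split_ifs with ha hb hb
          · simp
          · exact absurd (by exact_mod_cast ha) hb
          · exact absurd (by exact_mod_cast hb) ha
          · push_cast; ring
        have hrec := ih (i + 1) (by omega) (by omega)
        simp only [checkLoop, hguard, if_true, hg1, hg2, hne, ne_eq, not_true_eq_false,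
          if_false, ite_not]
        rw [show ((i : Int) + 1) = ((i + 1 : Nat) : Int) by push_cast; ring] at *
        rw [hjstep, hrec, matchFrom_succ_of_eq hlt (by rw [hgd1, hgd2, hne])]
        simp
      · -- mismatch: return False
        have hmf := matchFrom_false_of_ne hlt (by rw [hgd1, hgd2]; exact hne)
        simp only [checkLoop, hg1, hg2]
        rw [if_pos hguard, if_pos hne, hmf]
        simp

-- length and cyclic indexing of a flattened replicate
theorem length_flatten_replicate (q : Nat) (b : List Char) :
    (List.replicate q b).flatten.length = q * b.length := by
  induction q with
  | zero => simp
  | succ q ih => rw [List.replicate_succ, List.flatten_cons, List.length_append, ih]; ring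

theorem getD_flatten_replicate (b : List Char) (hb : 0 < b.length) :
    ∀ q k, k < q * b.length →
      ((List.replicate q b).flatten).getD k ' ' = b.getD (k % b.length) ' ' := by
  intro q
  induction q with
  | zero => intro k hk; omega
  | succ q ih =>
    intro k hk
    rw [List.replicate_succ, List.flatten_cons]
    by_cases h : k < b.length
    · rw [List.getD_append _ _ _ _ h, Nat.mod_eq_of_lt h]
    · have hq : (q + 1) * b.length = q * b.length + b.length := by ring
      rw [List.getD_append_right _ _ _ _ (by omega)]
      rw [ih (k - b.length) (by omega)]
      congr 1
      conv_rhs => rw [show k = (k - b.length) + b.length from by omega]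
      rw [Nat.add_mod_right]

-- B on the main domain computes the same "match ∧ divisible" condition
theorem check_alt_eq (s1 s2 : String) (N M : Nat) (hN : 0 < N) (hM : 0 < M)
    (h1 : N ≤ s1.toList.length) (h2 : min N M ≤ s2.toList.length) :
    check_alt s1 s2 (N : Int) (M : Int)
      = (matchFrom s1.toList s2.toList N M 0 && decide (N % M = 0)) := by
  set c1 := s1.toList
  set c2 := s2.toList
  have hn0 : ¬ ((N : Int) ≤ 0 ∨ (M : Int) ≤ 0) := by
    push_neg
    exact ⟨by exact_mod_cast hN, by exact_mod_cast hM⟩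
  have hmod : PySem.Int.mod (N : Int) (M : Int) = ((N % M : Nat) : Int) := PySem.Int.mod_natCast N M
  have hdiv : PySem.Int.floordiv (N : Int) (M : Int) = ((N / M : Nat) : Int) := PySem.Int.floordiv_natCast N M
  simp only [check_alt, hn0, if_false, hmod, hdiv, Int.toNat_natCast,
    PySem.List.slice_to_natCast]
  by_cases hdvd : N % M = 0
  · -- divisible: bulk list equality ↔ pointwise cyclic match
    have hNq : N / M * M = N := Nat.div_mul_cancel (Nat.dvd_of_mod_eq_zero hdvd)
    have hML2 : M ≤ c2.length := by
      have hMN : M ≤ N := Nat.le_of_dvd hN (Nat.dvd_of_mod_eq_zero hdvd)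
      omega
    have hlenb : (c2.take M).length = M := by simp [hML2]
    have hlen1 : (c1.take N).length = N := by simp [h1]
    have hlenf : ((List.replicate (N / M) (c2.take M)).flatten).length = N := by
      rw [length_flatten_replicate, hlenb, hNq]
    have htake1 : ∀ k, k < N → (c1.take N).getD k ' ' = c1.getD k ' ' := by
      intro k hk
      rw [List.getD_eq_getElem _ _ (by omega : k < (c1.take N).length),
        List.getElem_take, List.getD_eq_getElem _ _ (by omega : k < c1.length)]
    have htake2 : ∀ r, r < M → (c2.take M).getD r ' ' = c2.getD r ' ' := by
      intro r hr
      rw [List.getD_eq_getElem _ _ (by omega : r < (c2.take M).length),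
        List.getElem_take, List.getD_eq_getElem _ _ (by omega : r < c2.length)]
    have hflat : ∀ k, k < N →
        ((List.replicate (N / M) (c2.take M)).flatten).getD k ' ' = c2.getD (k % M) ' ' := by
      intro k hk
      rw [getD_flatten_replicate (c2.take M) (by omega) (N / M) k (by rw [hlenb, hNq]; exact hk)]
      rw [hlenb]
      exact htake2 (k % M) (Nat.mod_lt _ hM)
    have hiff : (c1.take N = (List.replicate (N / M) (c2.take M)).flatten)
        ↔ (∀ k, 0 ≤ k → k < N → c1.getD k ' ' = c2.getD (k % M) ' ') := by
      constructor
      · intro he k _ hk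
        have h := congrArg (fun l => l.getD k ' ') he
        simp only at h
        rw [htake1 k hk, hflat k hk] at h
        exact h
      · intro H
        apply List.ext_getElem (by rw [hlen1, hlenf])
        intro k hk hk'
        have hkN : k < N := by omega
        rw [← List.getD_eq_getElem _ ' ' hk, ← List.getD_eq_getElem _ ' ' hk']
        rw [htake1 k hkN, hflat k hkN]
        exact H k (Nat.zero_le k) hkN
    have hbeq : ((c1.take N) == (List.replicate (N / M) (c2.take M)).flatten)
        = matchFrom c1 c2 N M 0 := by
      rw [Bool.eq_iff_iff]
      simp only [beq_iff_eq, matchFrom, decide_eq_true_eq]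
      rw [hiff]
    rw [hbeq]
    simp [hdvd, Bool.and_comm]
  · have hd2 : ¬ ((M : Int) ∣ (N : Int)) := by
      rw [Int.natCast_dvd_natCast]
      intro hdd
      exact hdvd ((Nat.mod_eq_zero_of_dvd hdd))
    simp [hdvd, hd2]

-- ===== VERDICT (by name: the statement is the Claim_ definition above) =====
theorem check_spec : Claim_equal_check := by
  intro s1 s2 n m _ hpre
  unfold Spec_check check
  by_cases hn : n ≤ 0
  · -- loop never runs: both sides reduce to (n == 0)
    have hfuel : n.toNat + 1 = 1 := by omega
    have hguard : ¬ ((0 : Int) < n ∧ (0 : Int) < m) := by rintro ⟨h, -⟩; omega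
    have hb : (n ≤ 0 ∨ m ≤ 0) := Or.inl hn
    simp [checkLoop, hguard, check_alt, hb]
    exact eq_comm
  · push_neg at hn
    by_cases hm : m ≤ 0
    · -- guard j < m fails immediately: A returns False; B returns (n == 0) = False
      have hfuel : ∃ f, n.toNat + 1 = f + 1 := ⟨n.toNat, rfl⟩
      obtain ⟨f, hf⟩ := hfuel
      have hguard : ¬ ((0 : Int) < n ∧ (0 : Int) < m) := by rintro ⟨-, h⟩; omega
      have hb : (n ≤ 0 ∨ m ≤ 0) := Or.inr hm
      have hne : ¬ ((0 : Int) = n ∧ (0 : Int) = 0) := by rintro ⟨h, -⟩; omega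
      simp [hf, checkLoop, hguard, check_alt, hb]
      omega
    · push_neg at hm
      rcases hpre with h | h | h
      · omega
      · omega
      · -- main case
        obtain ⟨hp1, hp2⟩ := h
        set N := n.toNat with hN
        set M := m.toNat with hM
        have hnN : n = (N : Int) := by omega
        have hmM : m = (M : Int) := by omega
        have hN0 : 0 < N := by omega
        have hM0 : 0 < M := by omega
        have hb1 : N ≤ s1.toList.length := by omega
        have hb2 : min N M ≤ s2.toList.length := by
          rw [hnN, hmM] at hp2
          have h2c : ((min N M : Nat) : Int) ≤ (s2.toList.length : Int) := by
            rw [Nat.cast_min]; exact_mod_cast hp2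
          exact_mod_cast h2c
        rw [hnN, hmM]
        have h0 : ((0 : Nat) : Int) = (0 : Int) := rfl
        have hloop := checkLoop_eq s1.toList s2.toList N M hM0 hb1 hb2 (N + 1) 0
          (Nat.zero_le N) (by omega)
        have hz : ((0 % M : Nat) : Int) = (0 : Int) := by simp
        rw [hz] at hloop
        simp only [Nat.cast_zero] at hloop
        rw [hloop, check_alt_eq s1 s2 N M hN0 hM0 hb1 hb2]
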